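-- pv_equiv track=rewrite | github.com/descawed/galsdk | psx/cd/disc.py | from_bcd
-- ===== SOURCE A (Python) =====
-- def from_bcd(value: int) -> int:
--     out = 0
--     place = 1
--     while value > 0:
--         digit = value & 0xf
--         if digit > 9:
--             raise ValueError(f'{value:X} is not a valid binary-coded decimal number')
--         out += digit * place
--         place *= 10
--         value >>= 4
--     return out
-- ===== SOURCE B (Python) =====
-- def from_bcd(value: int) -> int:
--     # Format-and-parse: each BCD nibble is one hex digit, so the hex string of a
--     # valid BCD number is a decimal digit string whose decimal reading is the answer.
--     if value <= 0:
--         return 0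
--     s = format(value, 'x')
--     if any(c in 'abcdef' for c in s):
--         raise ValueError(f'{value:X} is not a valid binary-coded decimal number')
--     return int(s)
-- ===== Notes on version B (the rewrite author's own statement) =====
-- stated objective: alternative
-- what changed: Replaces the nibble-by-nibble arithmetic loop with place accumulator by formatting the value as a hex digit string and re-parsing that string as decimal (ported via base-16 digit extraction + base-10 recomposition), with a single digit-validity scan instead of a per-iteration check.
import Mathlib
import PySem

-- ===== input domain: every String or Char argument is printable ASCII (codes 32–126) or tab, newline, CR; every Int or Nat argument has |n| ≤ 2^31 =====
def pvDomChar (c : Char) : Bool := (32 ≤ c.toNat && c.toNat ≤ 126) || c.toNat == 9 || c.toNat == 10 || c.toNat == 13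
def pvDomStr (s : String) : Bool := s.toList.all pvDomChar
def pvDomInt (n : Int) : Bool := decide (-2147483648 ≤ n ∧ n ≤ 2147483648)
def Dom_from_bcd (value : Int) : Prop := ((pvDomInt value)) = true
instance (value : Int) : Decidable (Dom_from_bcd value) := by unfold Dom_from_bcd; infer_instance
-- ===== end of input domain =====

-- B replaces A's place-value accumulator loop by formatting the value as its base-16 digit string and re-parsing it as decimal (alternative decomposition, same cost).


-- ===== PORT A =====
-- while value > 0: digit = value & 0xf; if digit > 9: raise; out += digit*place; place *= 10; value >>= 4
def fromBcdLoop (value out place : Int) : Int :=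
  if 0 < value then
    let digit := PySem.Int.band value 15
    if digit > 9 then 0  -- Python raises ValueError here; such inputs are excluded by Pre_from_bcd
    else fromBcdLoop (value >>> (4:Nat)) (out + digit * place) (place * 10)
  else out
termination_by value.toNat
decreasing_by
  simp only [Int.shiftRight_eq_div_pow]
  omega

def from_bcd (value : Int) : Int := fromBcdLoop value 0 1

-- ===== PORT B =====
-- if value <= 0: return 0; s = format(value,'x'); if any hex letter in s: raise; return int(s)
-- format(value,'x') ↦ Nat.digits 16 (the base-16 digit list); int(s) on that digit string ↦ Nat.ofDigits 10
def from_bcd_alt (value : Int) : Int :=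
  if value ≤ 0 then 0
  else
    let ds := Nat.digits 16 value.toNat
    if ds.any (fun d => 9 < d) then 0  -- Python raises ValueError here; excluded by Pre_from_bcd
    else ((Nat.ofDigits 10 ds : Nat) : Int)

-- ===== PRECONDITION & SPEC =====
-- Pre_ excludes exactly the inputs with a hexadecimal nibble above 9 (within the 8 nibbles a Dom-sized
-- int can have), on which Python's from_bcd raises ValueError.
def Pre_from_bcd (value : Int) : Prop := ∀ i : Nat, i < 8 → (value.toNat >>> (4*i)) % 16 ≤ 9
instance (value : Int) : Decidable (Pre_from_bcd value) := by unfold Pre_from_bcd; infer_instance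

def pvWitness_from_bcd : Int := 291

def Spec_from_bcd (value : Int) (out : Int) : Prop := out = from_bcd_alt value
instance (value : Int) (out : Int) : Decidable (Spec_from_bcd value out) := by unfold Spec_from_bcd; infer_instance

-- ===== CLAIM (what is proved, stated in full; the proofs are below) =====
def Claim_equal_from_bcd : Prop := ∀ (value : Int), Dom_from_bcd value → Pre_from_bcd value → Spec_from_bcd value (from_bcd value)

-- ===== LEMMAS AND PROOFS =====

-- all nibbles of value (as a nonnegative number) are BCD digits
def pvGood (value : Int) : Prop := ∀ i : Nat, (value.toNat >>> (4*i)) % 16 ≤ 9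

lemma pvGood_of_dom_pre (value : Int) (hd : Dom_from_bcd value) (hp : Pre_from_bcd value) :
    pvGood value := by
  intro i
  by_cases h : i < 8
  · exact hp i h
  · have hv : value.toNat ≤ 2147483648 := by
      unfold Dom_from_bcd pvDomInt at hd
      simp only [decide_eq_true_eq] at hd
      omega
    have h32 : (4294967296:Nat) ≤ 2 ^ (4 * i) := by
      have h2 : (2:Nat) ^ 32 ≤ 2 ^ (4 * i) := Nat.pow_le_pow_right (by norm_num) (by omega)
      norm_num at h2
      exact h2
    have hlt : value.toNat < 2 ^ (4 * i) := lt_of_lt_of_le (by omega) h32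
    have h0 : value.toNat >>> (4 * i) = 0 := by
      rw [Nat.shiftRight_eq_div_pow]
      exact Nat.div_eq_of_lt hlt
    simp [h0]

-- pvGood restated on the natural number
def pvGoodN (n : Nat) : Prop := ∀ i : Nat, (n >>> (4*i)) % 16 ≤ 9

lemma pvGoodN_div (n : Nat) (hg : pvGoodN n) : pvGoodN (n / 16) := by
  intro i
  have := hg (i + 1)
  have e : (n / 16) >>> (4*i) = n >>> (4*(i+1)) := by
    simp only [Nat.shiftRight_eq_div_pow, Nat.div_div_eq_div_mul]
    congr 1
    ring
  rw [e]
  exact this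

lemma pvDigits_le_nine (n : Nat) (hg : pvGoodN n) :
    ∀ d ∈ Nat.digits 16 n, d ≤ 9 := by
  induction n using Nat.strong_induction_on with
  | _ n ih =>
    intro d hd
    rcases Nat.eq_zero_or_pos n with h0 | hpos
    · simp [h0] at hd
    · rw [Nat.digits_def' (by norm_num : 1 < 16) hpos] at hd
      rcases List.mem_cons.mp hd with h | h
      · subst h
        have := hg 0
        simpa using this
      · exact ih (n / 16) (Nat.div_lt_self hpos (by norm_num)) (pvGoodN_div n hg) d h

lemma pvShift4 (value : Int) (h : 0 ≤ value) :
    value >>> (4:Nat) = ((value.toNat >>> 4 : Nat) : Int) := by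
  conv_lhs => rw [← Int.toNat_of_nonneg h]
  simp [Int.shiftRight_eq_div_pow, Nat.shiftRight_eq_div_pow]

lemma pvDigit (value : Int) (h : 0 ≤ value) :
    PySem.Int.band value 15 = ((value.toNat % 16 : Nat) : Int) := by
  have h1 : PySem.Int.band value 15 = ((value.toNat &&& 15 : Nat) : Int) :=
    PySem.Int.band_of_nonneg h (by norm_num)
  have h2 : value.toNat &&& 15 = value.toNat % 16 := by
    have := Nat.and_two_pow_sub_one_eq_mod value.toNat 4
    simpa using this
  rw [h1, h2]

lemma pvShiftToNat (value : Int) (h : 0 ≤ value) :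
    (value >>> (4:Nat)).toNat = value.toNat >>> 4 := by
  rw [pvShift4 value h]
  exact Int.toNat_natCast _

-- the loop of A computes out + place * (decimal reading of the base-16 digits)
lemma pvLoop_eq (n : Nat) : ∀ (value out place : Int), value.toNat ≤ n → pvGoodN value.toNat →
    fromBcdLoop value out place = out + place * ((Nat.ofDigits 10 (Nat.digits 16 value.toNat) : Nat) : Int) := by
  induction n with
  | zero =>
    intro value out place hle _
    have hv : value ≤ 0 := by omega
    have h0 : value.toNat = 0 := by omega
    rw [fromBcdLoop]
    simp [not_lt.mpr hv, h0]
  | succ n ih =>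
    intro value out place hle hg
    by_cases hv : 0 < value
    · have hnn : (0:Int) ≤ value := le_of_lt hv
      have hpos : 0 < value.toNat := by omega
      have hd : PySem.Int.band value 15 = ((value.toNat % 16 : Nat) : Int) := pvDigit value hnn
      have hd9 : ¬ (PySem.Int.band value 15 > 9) := by
        rw [hd]
        have := hg 0
        simp only [Nat.mul_zero, Nat.shiftRight_zero] at this
        push_cast
        omega
      rw [fromBcdLoop]
      simp only [if_pos hv, if_neg hd9]
      have hle' : (value >>> (4:Nat)).toNat ≤ n := by
        rw [pvShiftToNat value hnn, Nat.shiftRight_eq_div_pow]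
        omega
      have hg' : pvGoodN (value >>> (4:Nat)).toNat := by
        rw [pvShiftToNat value hnn]
        have := pvGoodN_div value.toNat hg
        simpa [Nat.shiftRight_eq_div_pow] using this
      rw [ih (value >>> (4:Nat)) _ _ hle' hg']
      have hsh : (value >>> (4:Nat)).toNat = value.toNat / 16 := by
        rw [pvShiftToNat value hnn]; simp [Nat.shiftRight_eq_div_pow]
      rw [hsh, hd, Nat.digits_def' (by norm_num : 1 < 16) hpos, Nat.ofDigits_cons]
      push_cast
      ring
    · have h0 : value.toNat = 0 := by omega
      rw [fromBcdLoop]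
      simp [if_neg hv, h0]

-- ===== VERDICT (by name: the statement is the Claim_ definition above) =====
theorem from_bcd_spec : Claim_equal_from_bcd := by
  intro value hd hp
  have hg : pvGoodN value.toNat := pvGood_of_dom_pre value hd hp
  unfold Spec_from_bcd from_bcd from_bcd_alt
  by_cases hv : value ≤ 0
  · have h0 : value.toNat = 0 := by omega
    rw [pvLoop_eq value.toNat value 0 1 le_rfl hg]
    simp [hv, h0]
  · have hany : ¬ ((Nat.digits 16 value.toNat).any (fun d => 9 < d) = true) := by
      simp only [List.any_eq_true, not_exists, decide_eq_true_eq, not_and, not_lt]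
      intro d hdm
      exact pvDigits_le_nine value.toNat hg d hdm
    simp only [if_neg hv]
    rw [pvLoop_eq value.toNat value 0 1 le_rfl hg]
    simp [hany]
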